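-- pv_equiv track=rewrite | github.com/soongenwong/coding | company-specific-practice/Monzo/monzo1.py | getRequestStatus
-- ===== SOURCE A (Python) =====
-- import collections
-- import bisect
--
-- def getRequestStatus(requests):
--     # Write your code here(
--     domain_timestamps = collections.defaultdict(list)
--
--     ok_message = "{status: 200, message: OK}"
--     limit_message = "{status: 429, message: Too many requests}"
--
--
--     results = []
--
--     for i, domain in enumerate(requests):
--         ts_list = domain_timestamps[domain]
--
--         cutoff_30 = i - 30
--         start_index_30 = bisect.bisect_right(ts_list, cutoff_30)
--
--         ts_list = ts_list[start_index_30:]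
--
--         if len(ts_list) >= 5:
--             results.append(limit_message)
--             domain_timestamps[domain] = ts_list
--             continue
--
--         cutoff_5 = i - 5
--         start_index_5 = bisect.bisect_right(ts_list, cutoff_5)
--         count5 = len(ts_list) - start_index_5
--
--         if count5 >= 2:
--             results.append(limit_message)
--             domain_timestamps[domain] = ts_list
--             continue
--
--         results.append(ok_message)
--         ts_list.append(i)
--         domain_timestamps[domain] = ts_list
--
--     return results
-- ===== SOURCE B (Python) =====
-- import collections
--
-- def getRequestStatus(requests):
--     # Alternative: keep the FULL list of OK indices per domain (never trimmed)
--     # and count the windows with one bounded backward scan instead of bisect+slice.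
--     ok_indices = collections.defaultdict(list)
--     results = []
--     for i, domain in enumerate(requests):
--         idxs = ok_indices[domain]
--         count30 = 0
--         count5 = 0
--         for j in reversed(idxs):
--             if j <= i - 30:
--                 break
--             count30 += 1
--             if j > i - 5:
--                 count5 += 1
--         if count30 >= 5 or count5 >= 2:
--             results.append("{status: 429, message: Too many requests}")
--         else:
--             results.append("{status: 200, message: OK}")
--             idxs.append(i)
--     return results
-- ===== Notes on version B (the rewrite author's own statement) =====
-- stated objective: alternative
-- what changed: B keeps the full, never-trimmed list of OK indices per domain and counts both sliding windows with a single bounded backward scan (early break at i-30), instead of A's two bisect binary searches plus slice-and-reassign trimming of the stored list.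
import Mathlib
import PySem

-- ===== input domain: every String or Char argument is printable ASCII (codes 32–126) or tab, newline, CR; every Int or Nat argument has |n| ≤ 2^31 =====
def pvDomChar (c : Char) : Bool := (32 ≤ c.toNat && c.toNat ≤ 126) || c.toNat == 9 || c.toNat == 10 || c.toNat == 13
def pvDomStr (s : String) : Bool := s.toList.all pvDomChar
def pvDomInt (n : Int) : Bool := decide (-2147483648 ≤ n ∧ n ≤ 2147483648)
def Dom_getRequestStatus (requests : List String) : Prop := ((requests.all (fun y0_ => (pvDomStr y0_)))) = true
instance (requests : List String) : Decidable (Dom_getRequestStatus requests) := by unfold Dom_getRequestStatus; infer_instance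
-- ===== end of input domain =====

-- B replaces A's bisect-and-slice trimming of per-domain timestamp lists with an
-- untrimmed per-domain list of OK indices counted by one bounded backward scan (objective: alternative).

def okMessage : String := "{status: 200, message: OK}"
def limitMessage : String := "{status: 429, message: Too many requests}"

-- ===== PORT A =====
-- loop body of A: i = current enumerate index, d = domain_timestamps, acc = results
def goA (i : Int) (d : PySem.Dict String (List Int)) (acc : List String) : List String → List String
  | [] => acc
  | domain :: rest =>
    let ts := d.getD domain []
    let start30 := PySem.List.bisectRight ts (i - 30)
    let ts2 := PySem.List.slice ts (some (start30 : Int)) none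
    if 5 ≤ ts2.length then
      goA (i + 1) (d.insert domain ts2) (acc ++ [limitMessage]) rest
    else
      let start5 := PySem.List.bisectRight ts2 (i - 5)
      let count5 := ts2.length - start5
      if 2 ≤ count5 then
        goA (i + 1) (d.insert domain ts2) (acc ++ [limitMessage]) rest
      else
        goA (i + 1) (d.insert domain (ts2 ++ [i])) (acc ++ [okMessage]) rest

def getRequestStatus (requests : List String) : List String :=
  goA 0 PySem.Dict.empty [] requests

-- ===== PORT B =====
-- backward scan over reversed(idxs) with early break once j ≤ i - 30;
-- returns (count30, count5)
def scanBack (i : Int) : List Int → Nat × Nat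
  | [] => (0, 0)
  | j :: rest =>
    if j ≤ i - 30 then (0, 0)
    else
      let p := scanBack i rest
      (p.1 + 1, if i - 5 < j then p.2 + 1 else p.2)

def goB (i : Int) (d : PySem.Dict String (List Int)) (acc : List String) : List String → List String
  | [] => acc
  | domain :: rest =>
    let idxs := d.getD domain []
    let p := scanBack i idxs.reverse
    if 5 ≤ p.1 ∨ 2 ≤ p.2 then
      goB (i + 1) d (acc ++ [limitMessage]) rest
    else
      goB (i + 1) (d.insert domain (idxs ++ [i])) (acc ++ [okMessage]) rest

def getRequestStatus_alt (requests : List String) : List String :=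
  goB 0 PySem.Dict.empty [] requests

-- ===== PRECONDITION & SPEC =====
def Spec_getRequestStatus (requests : List String) (out : List String) : Prop := out = getRequestStatus_alt requests
instance (requests : List String) (out : List String) : Decidable (Spec_getRequestStatus requests out) := by unfold Spec_getRequestStatus; infer_instance

-- ===== CLAIM (what is proved, stated in full; the proofs are below) =====
def Claim_equal_getRequestStatus : Prop := ∀ (requests : List String), Dom_getRequestStatus requests → Spec_getRequestStatus requests (getRequestStatus requests)

-- ===== LEMMAS AND PROOFS =====

-- the coupling invariant: B's dict holds the full, strictly increasing list of OK
-- indices (all < i); A's dict holds its suffix above some cutoff c ≤ i - 31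
def LoopInv (i : Int) (dA dB : PySem.Dict String (List Int)) : Prop :=
  ∀ dom : String,
    (dB.getD dom []).Pairwise (· < ·) ∧
    (∀ x ∈ dB.getD dom [], x < i) ∧
    ∃ c : Int, c ≤ i - 31 ∧ dA.getD dom [] = (dB.getD dom []).filter (fun x => decide (c < x))

lemma drop_bisectRight (xs : List Int) (x : Int) (h : xs.Pairwise (· ≤ ·)) :
    xs.drop (PySem.List.bisectRight xs x) = xs.filter (fun e => decide (x < e)) := by
  obtain ⟨hk, hbefore, hafter⟩ := PySem.List.bisectRight_spec xs x h
  set k := PySem.List.bisectRight xs x with hkdef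
  conv_rhs => rw [← List.take_append_drop k xs]
  rw [List.filter_append]
  have h1 : (xs.take k).filter (fun e => decide (x < e)) = [] := by
    rw [List.filter_eq_nil_iff]
    intro a ha
    obtain ⟨i, hi, rfl⟩ := List.mem_iff_getElem.mp ha
    have hi' : i < k := lt_of_lt_of_le hi (by simp [List.length_take])
    have hix : i < xs.length := lt_of_lt_of_le hi' hk
    have := hbefore i hix hi'
    simp only [List.getElem_take]
    simpa using not_lt.mpr this
  have h2 : (xs.drop k).filter (fun e => decide (x < e)) = xs.drop k := by
    rw [List.filter_eq_self]
    intro a ha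
    obtain ⟨i, hi, rfl⟩ := List.mem_iff_getElem.mp ha
    rw [List.getElem_drop]
    have hix : k + i < xs.length := by
      have := hi; rw [List.length_drop] at this; omega
    simpa using hafter (k + i) hix (by omega)
  rw [h1, h2, List.nil_append]

lemma filter_absorb (L : List Int) {c b : Int} (hcb : c ≤ b) :
    (L.filter (fun x => decide (c < x))).filter (fun x => decide (b < x)) =
      L.filter (fun x => decide (b < x)) := by
  induction L with
  | nil => simp
  | cons a t ih =>
    by_cases hb : b < a
    · have hc : c < a := lt_of_le_of_lt hcb hb
      simp [hb, hc, ih]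
    · by_cases hc : c < a
      · simp [hb, hc, ih]
      · simp [hb, hc, ih]

lemma scanBack_eq (i : Int) (r : List Int) (h : r.Pairwise (· > ·)) :
    scanBack i r = ((r.filter (fun x => decide (i - 30 < x))).length,
                    (r.filter (fun x => decide (i - 5 < x))).length) := by
  induction r with
  | nil => simp [scanBack]
  | cons j t ih =>
    rw [List.pairwise_cons] at h
    obtain ⟨hj, ht⟩ := h
    by_cases hle : j ≤ i - 30
    · have h30 : (j :: t).filter (fun x => decide (i - 30 < x)) = [] := by
        rw [List.filter_eq_nil_iff]
        intro a ha
        rcases List.mem_cons.mp ha with rfl | ha'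
        · simpa using not_lt.mpr hle
        · have := hj a ha'
          simp only [decide_eq_true_eq, not_lt]
          omega
      have h5 : (j :: t).filter (fun x => decide (i - 5 < x)) = [] := by
        rw [List.filter_eq_nil_iff]
        intro a ha
        rcases List.mem_cons.mp ha with rfl | ha'
        · simp only [decide_eq_true_eq, not_lt]; omega
        · have := hj a ha'
          simp only [decide_eq_true_eq, not_lt]
          omega
      simp [scanBack, hle, h30, h5]
    · have hgt : i - 30 < j := by omega
      by_cases h5j : i - 5 < j
      · simp [scanBack, hle, h5j, hgt, ih ht]
      · simp [scanBack, hle, h5j, hgt, ih ht]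

lemma goA_eq_goB (rest : List String) :
    ∀ (i : Int) (dA dB : PySem.Dict String (List Int)) (acc : List String),
      LoopInv i dA dB → goA i dA acc rest = goB i dB acc rest := by
  induction rest with
  | nil => intro i dA dB acc _; rfl
  | cons domain rest ih =>
    intro i dA dB acc hInv
    obtain ⟨hpair, hlt, c, hc, hts⟩ := hInv domain
    set L := dB.getD domain [] with hL
    set ts := dA.getD domain [] with htsdef
    -- A's trimmed list equals the (i-30)-filter of B's full list
    have hts_sorted : ts.Pairwise (· ≤ ·) := by
      rw [hts]; exact (hpair.filter _).imp le_of_lt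
    have hts2 : PySem.List.slice ts (some ((PySem.List.bisectRight ts (i - 30) : Nat) : Int)) none
        = L.filter (fun x => decide (i - 30 < x)) := by
      rw [PySem.List.slice_from_natCast, drop_bisectRight ts (i - 30) hts_sorted, hts,
        filter_absorb L (by omega : c ≤ i - 30)]
    -- B's scan returns exactly the two window counts
    have hscan : scanBack i L.reverse =
        ((L.filter (fun x => decide (i - 30 < x))).length,
         (L.filter (fun x => decide (i - 5 < x))).length) := by
      rw [scanBack_eq i L.reverse (List.pairwise_reverse.mpr hpair)]
      simp [List.filter_reverse]
    -- A's count5 equals B's count5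
    set ts2 := L.filter (fun x => decide (i - 30 < x)) with hts2def
    have hts2_sorted : ts2.Pairwise (· ≤ ·) := (hpair.filter _).imp le_of_lt
    have hcount5 : ts2.length - PySem.List.bisectRight ts2 (i - 5) =
        (L.filter (fun x => decide (i - 5 < x))).length := by
      have hk := (PySem.List.bisectRight_spec ts2 (i - 5) hts2_sorted).1
      have hdrop := drop_bisectRight ts2 (i - 5) hts2_sorted
      have : (ts2.drop (PySem.List.bisectRight ts2 (i - 5))).length =
          (ts2.filter (fun e => decide (i - 5 < e))).length := by rw [hdrop]
      rw [List.length_drop] at this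
      rw [this, hts2def, filter_absorb L (by omega : i - 30 ≤ i - 5)]
    -- invariant preservation, blocked branch (A stores the trimmed list, B unchanged)
    have hInvBlock : LoopInv (i + 1) (dA.insert domain ts2) dB := by
      intro dom
      by_cases hdom : dom = domain
      · subst hdom
        refine ⟨hpair, fun x hx => by have := hlt x hx; omega, i - 30, by omega, ?_⟩
        rw [PySem.Dict.getD_insert_self]
      · obtain ⟨hp, hl, c', hc', he⟩ := hInv dom
        exact ⟨hp, fun x hx => by have := hl x hx; omega, c', by omega,
          by rw [PySem.Dict.getD_insert_of_ne _ _ _ hdom]; exact he⟩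
    -- invariant preservation, OK branch (A appends i to the trimmed list, B to the full list)
    have hInvOk : LoopInv (i + 1) (dA.insert domain (ts2 ++ [i])) (dB.insert domain (L ++ [i])) := by
      intro dom
      by_cases hdom : dom = domain
      · subst hdom
        rw [PySem.Dict.getD_insert_self, PySem.Dict.getD_insert_self]
        refine ⟨?_, ?_, i - 30, by omega, ?_⟩
        · rw [List.pairwise_append]
          exact ⟨hpair, List.pairwise_singleton _ _,
            fun x hx y hy => by rw [List.mem_singleton] at hy; subst hy; exact hlt x hx⟩
        · intro x hx
          rcases List.mem_append.mp hx with hx' | hx'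
          · have := hlt x hx'; omega
          · rw [List.mem_singleton] at hx'; omega
        · rw [List.filter_append, hts2def]
          congr 1
          simp only [List.filter_cons, List.filter_nil]
          rw [if_pos (by simp only [decide_eq_true_eq]; omega)]
      · obtain ⟨hp, hl, c', hc', he⟩ := hInv dom
        rw [PySem.Dict.getD_insert_of_ne _ _ _ hdom, PySem.Dict.getD_insert_of_ne _ _ _ hdom]
        exact ⟨hp, fun x hx => by have := hl x hx; omega, c', by omega, he⟩
    -- unfold one step of each loop and match the branches
    show goA i dA acc (domain :: rest) = goB i dB acc (domain :: rest)
    rw [goA, goB]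
    simp only [← hL, ← htsdef, hts2, hscan, hcount5]
    by_cases h5 : 5 ≤ ts2.length
    · rw [if_pos h5, if_pos (Or.inl h5)]
      exact ih (i + 1) _ dB _ hInvBlock
    · rw [if_neg h5]
      by_cases h2 : 2 ≤ (L.filter (fun x => decide (i - 5 < x))).length
      · rw [if_pos h2, if_pos (Or.inr h2)]
        exact ih (i + 1) _ dB _ hInvBlock
      · rw [if_neg h2, if_neg (by omega)]
        exact ih (i + 1) _ _ _ hInvOk

lemma Inv_init : LoopInv 0 PySem.Dict.empty PySem.Dict.empty := by
  intro dom
  refine ⟨?_, ?_, -31, by omega, ?_⟩ <;> simp [pysem]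

-- ===== VERDICT (by name: the statement is the Claim_ definition above) =====
theorem getRequestStatus_spec : Claim_equal_getRequestStatus := by
  intro requests _
  show getRequestStatus requests = getRequestStatus_alt requests
  exact goA_eq_goB requests 0 _ _ [] Inv_init
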